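-- pv_equiv track=rewrite | github.com/gaojielin/SoldHouseAnalysis | utils.py | extractPendingDate
-- ===== SOURCE A (Python) =====
-- def extractPendingDate(history):
--     list = [s for s in history.split('\n') if s is not None and len(s) > 0]
--     res = []
--
--     for i in range(0, len(list)):
--         # find price
--         if 'Pending' in list[i]:
--             date = ''
--             state = list[i]
--             # find date and state
--             for j in range(i, 0, -1):
--                 # find date
--                 if 'Date' in list[j]:
--                     date = list[j - 1]
--
--                 if len(date) != 0 :
--                     break
--             res.append((date,state))
--             if len(date) != 0 :
--                 break
--     return res
-- ===== SOURCE B (Python) =====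
-- def extractPendingDate(history):
--     res = []
--     last_date = ''
--     prev = None
--     for line in history.split('\n'):
--         if not line:
--             continue
--         if prev is not None and 'Date' in line:
--             last_date = prev
--         if 'Pending' in line:
--             res.append((last_date, line))
--             if last_date:
--                 break
--         prev = line
--     return res
-- ===== Notes on version B (the rewrite author's own statement) =====
-- stated objective: faster
-- what changed: Replaces A's backward inner scan for the nearest preceding 'Date' line on every 'Pending' line with a single forward pass that tracks the previous line and the most recent date while iterating the split lines once.
import Mathlib
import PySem

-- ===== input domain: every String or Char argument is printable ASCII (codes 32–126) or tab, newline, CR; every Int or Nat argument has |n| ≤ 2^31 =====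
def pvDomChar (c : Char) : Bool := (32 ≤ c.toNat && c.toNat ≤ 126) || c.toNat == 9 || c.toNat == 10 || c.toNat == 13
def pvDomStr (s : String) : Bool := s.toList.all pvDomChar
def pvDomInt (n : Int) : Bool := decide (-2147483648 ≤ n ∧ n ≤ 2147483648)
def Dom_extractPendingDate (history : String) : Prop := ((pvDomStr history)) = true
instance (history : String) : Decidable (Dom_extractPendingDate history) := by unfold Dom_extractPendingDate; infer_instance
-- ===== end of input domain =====

-- B replaces A's per-'Pending' backward inner scan with a single forward pass that
-- tracks the nearest preceding date (one linear traversal instead of nested scans).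

-- ===== PORT A =====
-- inner loop: for j in range(i, 0, -1): if 'Date' in list[j]: date = list[j-1]; if len(date) != 0: break
def pvAFind (lst : List String) : List Int → String → String
  | [], date => date
  | j :: js, date =>
    let date := if PySem.Str.isIn "Date" (PySem.List.pyGetD lst j "") then PySem.List.pyGetD lst (j - 1) "" else date
    if PySem.Str.len date ≠ 0 then date else pvAFind lst js date

-- outer loop: for i in range(0, len(list)) with the trailing break on a nonempty date
def pvALoop (lst : List String) : List Int → List (String × String) → List (String × String)
  | [], res => res
  | i :: is, res =>
    if PySem.Str.isIn "Pending" (PySem.List.pyGetD lst i "") then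
      let date := pvAFind lst (PySem.List.pyRange i 0 (-1)) ""
      let state := PySem.List.pyGetD lst i ""
      let res := res ++ [(date, state)]
      if PySem.Str.len date ≠ 0 then res else pvALoop lst is res
    else pvALoop lst is res

def extractPendingDate (history : String) : List (String × String) :=
  let lst := ((PySem.Str.split? history "\n").getD []).filter (fun s => decide (PySem.Str.len s > 0))
  pvALoop lst (PySem.List.pyRange 0 (PySem.List.len lst) 1) []

-- ===== PORT B =====
-- one forward pass over the split lines: skip empties, track prev line and last_date
def pvBLoop : Option String → String → List (String × String) → List String → List (String × String)
  | _, _, res, [] => res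
  | prev, lastDate, res, line :: rest =>
    if PySem.Str.len line = 0 then pvBLoop prev lastDate res rest
    else
      let lastDate := match prev with
        | some p => if PySem.Str.isIn "Date" line then p else lastDate
        | none => lastDate
      if PySem.Str.isIn "Pending" line then
        let res := res ++ [(lastDate, line)]
        if lastDate ≠ "" then res else pvBLoop (some line) lastDate res rest
      else pvBLoop (some line) lastDate res rest

def extractPendingDate_alt (history : String) : List (String × String) :=
  pvBLoop none "" [] ((PySem.Str.split? history "\n").getD [])

-- ===== PRECONDITION & SPEC =====
def Spec_extractPendingDate (history : String) (out : List (String × String)) : Prop := out = extractPendingDate_alt history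
instance (history : String) (out : List (String × String)) : Decidable (Spec_extractPendingDate history out) := by unfold Spec_extractPendingDate; infer_instance

-- ===== CLAIM (what is proved, stated in full; the proofs are below) =====
def Claim_equal_extractPendingDate : Prop := ∀ (history : String), Dom_extractPendingDate history → Spec_extractPendingDate history (extractPendingDate history)

-- ===== LEMMAS AND PROOFS =====

-- proof helpers: B's loop with the empty-line skip already performed
def pvBLoopF : Option String → String → List (String × String) → List String → List (String × String)
  | _, _, res, [] => res
  | prev, lastDate, res, line :: rest =>
    let lastDate := match prev with
      | some p => if PySem.Str.isIn "Date" line then p else lastDate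
      | none => lastDate
    if PySem.Str.isIn "Pending" line then
      let res := res ++ [(lastDate, line)]
      if lastDate ≠ "" then res else pvBLoopF (some line) lastDate res rest
    else pvBLoopF (some line) lastDate res rest

-- the running state of B at the start of iteration i
def pvPrevAt (lst : List String) : Nat → Option String
  | 0 => none
  | i + 1 => some (lst.getD i "")

def pvDAt (lst : List String) : Nat → String
  | 0 => ""
  | i + 1 => pvAFind lst (PySem.List.pyRange (i : Int) 0 (-1)) ""

theorem pvBLoop_eq_filter (prev : Option String) (d : String) (res : List (String × String))
    (xs : List String) :
    pvBLoop prev d res xs = pvBLoopF prev d res (xs.filter (fun s => decide (PySem.Str.len s > 0))) := by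
  induction xs generalizing prev d res with
  | nil => rfl
  | cons line rest ih =>
    by_cases h : PySem.Str.len line = 0
    · have h' : ¬ (PySem.Str.len line > 0) := by omega
      simp only [pvBLoop, List.filter_cons, h, if_pos, decide_eq_true_eq]
      exact ih prev d res
    · have h' : PySem.Str.len line > 0 := by
        have : (0 : Int) ≤ PySem.Str.len line := by simp [PySem.Str.len_eq]
        omega
      simp only [pvBLoop, pvBLoopF, List.filter_cons, h, if_neg, decide_eq_true_eq, h', if_pos,
        not_false_eq_true, ih]

theorem pvLenNe (s : String) : (PySem.Str.len s ≠ 0) ↔ (s ≠ "") := by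
  rw [PySem.Str.len_eq]
  constructor
  · intro h he; subst he; simp at h
  · intro h hl
    exact h (String.length_eq_zero_iff.mp (by exact_mod_cast hl))

theorem pvDAt_succ (lst : List String) (hne : ∀ s ∈ lst, PySem.Str.len s ≠ 0) (i : Nat)
    (h : i < lst.length) :
    pvDAt lst (i + 1) = (match pvPrevAt lst i with
      | some p => if PySem.Str.isIn "Date" (lst.getD i "") = true then p else pvDAt lst i
      | none => pvDAt lst i) := by
  cases i with
  | zero =>
    simp [pvDAt, pvPrevAt, pvAFind, PySem.List.pyRange_neg_one_eq_nil (by omega : (0:Int) ≤ 0)]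
  | succ m =>
    have hm : m < lst.length := by omega
    have hmem : lst.getD m "" ∈ lst := by
      rw [List.getD_eq_getElem?_getD, List.getElem?_eq_getElem hm]
      exact List.getElem_mem hm
    have hne' : lst.getD m "" ≠ "" := (pvLenNe _).mp (hne _ hmem)
    have hcast : ((m + 1 : Nat) : Int) - 1 = ((m : Nat) : Int) := by push_cast; ring
    rw [pvDAt, PySem.List.pyRange_neg_one_cons (by exact_mod_cast Nat.succ_pos m)]
    simp only [pvAFind, hcast, PySem.List.pyGetD_natCast, pvPrevAt]
    by_cases hD : PySem.Str.isIn "Date" (lst.getD (m + 1) "") = true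
    · rw [if_pos hD, if_pos ((pvLenNe _).mpr hne'), if_pos hD]
    · have h0 : ¬ (PySem.Str.len "" ≠ 0) := by simp [PySem.Str.len_eq]
      rw [if_neg hD, if_neg h0, if_neg hD]
      rfl

theorem pvMain (lst : List String) (hne : ∀ s ∈ lst, PySem.Str.len s ≠ 0) :
    ∀ (n i : Nat) (res : List (String × String)), i ≤ lst.length → lst.length - i = n →
    pvALoop lst (PySem.List.pyRange (i : Int) (lst.length : Int) 1) res
      = pvBLoopF (pvPrevAt lst i) (pvDAt lst i) res (lst.drop i) := by
  intro n
  induction n with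
  | zero =>
    intro i res hle hn
    have hi : i = lst.length := by omega
    subst hi
    rw [PySem.List.pyRange_one_eq_nil (by omega), List.drop_length]
    rfl
  | succ n ih =>
    intro i res hle hn
    have hlt : i < lst.length := by omega
    have hcast : ((i : Int) + 1) = ((i + 1 : Nat) : Int) := by push_cast; ring
    rw [PySem.List.pyRange_one_cons (by exact_mod_cast hlt), List.drop_eq_getElem_cons hlt]
    have hget : lst[i] = lst.getD i "" := by
      rw [List.getD_eq_getElem?_getD, List.getElem?_eq_getElem hlt]; rfl
    simp only [pvALoop, pvBLoopF, PySem.List.pyGetD_natCast, hget]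
    rw [← pvDAt_succ lst hne i hlt]
    have hdate : pvAFind lst (PySem.List.pyRange (i : Int) 0 (-1)) "" = pvDAt lst (i + 1) := rfl
    rw [hdate, hcast]
    have hprev : pvPrevAt lst (i + 1) = some (lst.getD i "") := rfl
    by_cases hP : PySem.Str.isIn "Pending" (lst.getD i "") = true
    · rw [if_pos hP, if_pos hP]
      by_cases hd : pvDAt lst (i + 1) = ""
      · have hA : ¬ (PySem.Str.len (pvDAt lst (i + 1)) ≠ 0) := by
          simp [hd, PySem.Str.len_eq]
        have hB : ¬ (pvDAt lst (i + 1) ≠ "") := by simp [hd]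
        rw [if_neg hA, if_neg hB, ih (i + 1) _ (by omega) (by omega), hprev]
      · rw [if_pos ((pvLenNe _).mpr hd), if_pos hd]
    · rw [if_neg hP, if_neg hP, ih (i + 1) _ (by omega) (by omega), hprev]

-- ===== VERDICT (by name: the statement is the Claim_ definition above) =====
theorem extractPendingDate_spec : Claim_equal_extractPendingDate := by
  intro history _
  unfold Spec_extractPendingDate extractPendingDate extractPendingDate_alt
  rw [pvBLoop_eq_filter]
  have h := pvMain (((PySem.Str.split? history "\n").getD []).filter (fun s => decide (PySem.Str.len s > 0)))
    (by intro s hs; have := List.of_mem_filter hs; simp at this ⊢; intro h; subst h; simp at this)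
    _ 0 [] (Nat.zero_le _) rfl
  simpa [pvPrevAt, pvDAt, PySem.List.len_eq] using h
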